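-- pv_equiv track=rewrite | github.com/charlieholden1/FALCON | radar_diag.py | build_stage_commands
-- ===== SOURCE A (Python) =====
-- from typing import Iterable, List, Optional, Sequence, Tuple
--
-- RF_COMMANDS = {
--     "dfeDataOutputMode",
--     "channelCfg",
--     "adcCfg",
--     "adcbufCfg",
--     "profileCfg",
--     "chirpCfg",
--     "frameCfg",
-- }
--
-- DETECTION_COMMANDS = {
--     "dynamicRACfarCfg",
--     "staticRACfarCfg",
--     "dynamicRangeAngleCfg",
--     "dynamic2DAngleCfg",
--     "staticRangeAngleCfg",
--     "fineMotionCfg",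
--     "fovCfg",
-- }
--
-- GEOMETRY_COMMANDS = {
--     "antGeometry0",
--     "antGeometry1",
--     "antPhaseRot",
--     "compRangeBiasAndRxChanPhase",
-- }
--
-- TRACKER_COMMANDS = {
--     "staticBoundaryBox",
--     "boundaryBox",
--     "sensorPosition",
--     "gatingParam",
--     "stateParam",
--     "allocationParam",
--     "maxAcceleration",
--     "trackingCfg",
-- }
--
-- PRESENCE_COMMANDS = {"presenceBoundaryBox"}
--
-- def build_stage_commands(lines: Sequence[str]) -> List[Tuple[str, List[str]]]:
--     groups = {
--         "rf_core": [],
--         "detection": [],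
--         "geometry": [],
--         "tracker": [],
--         "presence": [],
--     }
--
--     for line in lines:
--         cmd = line.split()[0]
--         if cmd in ("sensorStop", "flushCfg", "sensorStart"):
--             continue
--         if cmd in RF_COMMANDS:
--             groups["rf_core"].append(line)
--         elif cmd in DETECTION_COMMANDS:
--             groups["detection"].append(line)
--         elif cmd in GEOMETRY_COMMANDS:
--             groups["geometry"].append(line)
--         elif cmd in TRACKER_COMMANDS:
--             groups["tracker"].append(line)
--         elif cmd in PRESENCE_COMMANDS:
--             groups["presence"].append(line)
--         else:
--             groups["tracker"].append(line)
--
--     cumulative: List[str] = []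
--     out: List[Tuple[str, List[str]]] = []
--     for stage_name in ("rf_core", "detection", "geometry", "tracker", "presence"):
--         stage_lines = groups[stage_name]
--         if not stage_lines:
--             continue
--         cumulative.extend(stage_lines)
--         commands = ["sensorStop", "flushCfg", *cumulative, "sensorStart"]
--         out.append((stage_name, commands))
--     return out
-- ===== SOURCE B (Python) =====
-- from typing import List, Sequence, Tuple
--
-- RF_COMMANDS = {
--     "dfeDataOutputMode", "channelCfg", "adcCfg", "adcbufCfg",
--     "profileCfg", "chirpCfg", "frameCfg",
-- }
-- DETECTION_COMMANDS = {
--     "dynamicRACfarCfg", "staticRACfarCfg", "dynamicRangeAngleCfg",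
--     "dynamic2DAngleCfg", "staticRangeAngleCfg", "fineMotionCfg", "fovCfg",
-- }
-- GEOMETRY_COMMANDS = {
--     "antGeometry0", "antGeometry1", "antPhaseRot", "compRangeBiasAndRxChanPhase",
-- }
-- PRESENCE_COMMANDS = {"presenceBoundaryBox"}
--
-- _SKIP = {"sensorStop", "flushCfg", "sensorStart"}
-- # everything classified somewhere other than the tracker bucket
-- _KNOWN = _SKIP | RF_COMMANDS | DETECTION_COMMANDS | GEOMETRY_COMMANDS | PRESENCE_COMMANDS
--
--
-- def build_stage_commands(lines: Sequence[str]) -> List[Tuple[str, List[str]]]: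
--     buckets = [
--         ("rf_core",   [l for l in lines if l.split()[0] in RF_COMMANDS]),
--         ("detection", [l for l in lines if l.split()[0] in DETECTION_COMMANDS]),
--         ("geometry",  [l for l in lines if l.split()[0] in GEOMETRY_COMMANDS]),
--         ("tracker",   [l for l in lines if l.split()[0] not in _KNOWN]),
--         ("presence",  [l for l in lines if l.split()[0] in PRESENCE_COMMANDS]),
--     ]
--     out: List[Tuple[str, List[str]]] = []
--     cumulative: List[str] = []
--     for name, group in buckets:
--         if group:
--             cumulative = cumulative + group
--             out.append((name, ["sensorStop", "flushCfg", *cumulative, "sensorStart"]))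
--     return out
-- ===== Notes on version B (the rewrite author's own statement) =====
-- stated objective: simpler
-- what changed: Replaces A's single classify-with-branches loop that mutates a dict of five buckets by five independent filter passes over the lines (the tracker bucket is the catch-all 'first word not in any known command set'), followed by the same cumulative emit loop.
import Mathlib
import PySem

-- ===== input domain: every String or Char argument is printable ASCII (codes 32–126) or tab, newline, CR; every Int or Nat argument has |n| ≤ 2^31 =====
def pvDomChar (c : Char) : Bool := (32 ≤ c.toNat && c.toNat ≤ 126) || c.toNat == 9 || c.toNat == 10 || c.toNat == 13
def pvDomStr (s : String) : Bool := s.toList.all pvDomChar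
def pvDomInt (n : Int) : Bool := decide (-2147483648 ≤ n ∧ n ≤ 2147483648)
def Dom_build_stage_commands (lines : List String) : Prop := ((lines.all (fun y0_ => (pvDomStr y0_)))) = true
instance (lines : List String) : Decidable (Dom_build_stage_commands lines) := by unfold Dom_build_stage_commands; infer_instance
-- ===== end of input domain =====

-- B replaces A's classify-and-mutate dict loop by five independent filter passes over the
-- lines (the tracker bucket is the catch-all "first word not in any known set"); simpler, same cost.

-- module-level command sets (Python sets of distinct string literals, as lists)
def rfCommands : List String :=
  ["dfeDataOutputMode", "channelCfg", "adcCfg", "adcbufCfg", "profileCfg", "chirpCfg", "frameCfg"]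
def detectionCommands : List String :=
  ["dynamicRACfarCfg", "staticRACfarCfg", "dynamicRangeAngleCfg", "dynamic2DAngleCfg",
   "staticRangeAngleCfg", "fineMotionCfg", "fovCfg"]
def geometryCommands : List String :=
  ["antGeometry0", "antGeometry1", "antPhaseRot", "compRangeBiasAndRxChanPhase"]
def trackerCommands : List String :=
  ["staticBoundaryBox", "boundaryBox", "sensorPosition", "gatingParam", "stateParam",
   "allocationParam", "maxAcceleration", "trackingCfg"]
def presenceCommands : List String := ["presenceBoundaryBox"]

-- ===== PORT A =====
-- line.split()[0]; under Pre_ the split is nonempty, so the default is never used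
def aHead (line : String) : String := PySem.List.pyGetD (PySem.Str.split₀ line) 0 ""

-- the body of A's classification loop (dict mutation via modify = groups[k].append(line))
def aStep (g : PySem.Dict String (List String)) (line : String) : PySem.Dict String (List String) :=
  let cmd := aHead line
  if cmd = "sensorStop" ∨ cmd = "flushCfg" ∨ cmd = "sensorStart" then g
  else if cmd ∈ rfCommands then g.modify "rf_core" [] (· ++ [line])
  else if cmd ∈ detectionCommands then g.modify "detection" [] (· ++ [line])
  else if cmd ∈ geometryCommands then g.modify "geometry" [] (· ++ [line])
  else if cmd ∈ trackerCommands then g.modify "tracker" [] (· ++ [line])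
  else if cmd ∈ presenceCommands then g.modify "presence" [] (· ++ [line])
  else g.modify "tracker" [] (· ++ [line])

def build_stage_commands (lines : List String) : List (String × List String) :=
  let groups0 : PySem.Dict String (List String) :=
    PySem.Dict.ofList [("rf_core", []), ("detection", []), ("geometry", []), ("tracker", []), ("presence", [])]
  let groups := lines.foldl aStep groups0
  let res := ["rf_core", "detection", "geometry", "tracker", "presence"].foldl
    (fun (st : List String × List (String × List String)) stage_name =>
      let stage_lines := groups.getD stage_name []
      if stage_lines = [] then st
      else (st.1 ++ stage_lines,
            st.2 ++ [(stage_name, ["sensorStop", "flushCfg"] ++ (st.1 ++ stage_lines) ++ ["sensorStart"])]))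
    ([], [])
  res.2

-- ===== PORT B =====
def knownCommands : List String :=
  ["sensorStop", "flushCfg", "sensorStart"] ++ rfCommands ++ detectionCommands ++ geometryCommands ++ presenceCommands

def build_stage_commands_alt (lines : List String) : List (String × List String) :=
  let buckets : List (String × List String) :=
    [("rf_core",   lines.filter (fun l => decide (aHead l ∈ rfCommands))),
     ("detection", lines.filter (fun l => decide (aHead l ∈ detectionCommands))),
     ("geometry",  lines.filter (fun l => decide (aHead l ∈ geometryCommands))),
     ("tracker",   lines.filter (fun l => decide (aHead l ∉ knownCommands))),
     ("presence",  lines.filter (fun l => decide (aHead l ∈ presenceCommands)))]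
  let res := buckets.foldl
    (fun (st : List String × List (String × List String)) nb =>
      if nb.2 = [] then st
      else (st.1 ++ nb.2,
            st.2 ++ [(nb.1, ["sensorStop", "flushCfg"] ++ (st.1 ++ nb.2) ++ ["sensorStart"])]))
    ([], [])
  res.2

-- ===== PRECONDITION & SPEC =====
-- Pre_ excludes exactly the inputs where A raises IndexError: a line that is empty or
-- all whitespace, whose split has no words, so indexing its first word raises.
def Pre_build_stage_commands (lines : List String) : Prop :=
  ∀ l ∈ lines, PySem.Str.split₀ l ≠ []
instance (lines : List String) : Decidable (Pre_build_stage_commands lines) := by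
  unfold Pre_build_stage_commands; infer_instance
def pvWitness_build_stage_commands : List String :=
  ["sensorStop", "profileCfg 1 2", "trackingCfg 3", "mysteryCmd", "presenceBoundaryBox 0"]

def Spec_build_stage_commands (lines : List String) (out : List (String × List String)) : Prop := out = build_stage_commands_alt lines
instance (lines : List String) (out : List (String × List String)) : Decidable (Spec_build_stage_commands lines out) := by unfold Spec_build_stage_commands; infer_instance

-- ===== CLAIM (what is proved, stated in full; the proofs are below) =====
def Claim_equal_build_stage_commands : Prop := ∀ (lines : List String), Dom_build_stage_commands lines → Pre_build_stage_commands lines → Spec_build_stage_commands lines (build_stage_commands lines)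

-- ===== LEMMAS AND PROOFS =====

-- proof-side view of A's branch chain: which bucket a command goes to (none = skipped)
def aClassify (cmd : String) : Option String :=
  if cmd = "sensorStop" ∨ cmd = "flushCfg" ∨ cmd = "sensorStart" then none
  else if cmd ∈ rfCommands then some "rf_core"
  else if cmd ∈ detectionCommands then some "detection"
  else if cmd ∈ geometryCommands then some "geometry"
  else if cmd ∈ trackerCommands then some "tracker"
  else if cmd ∈ presenceCommands then some "presence"
  else some "tracker"

lemma aStep_eq (g : PySem.Dict String (List String)) (line : String) :
    aStep g line = match aClassify (aHead line) with
      | none => g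
      | some k => g.modify k [] (· ++ [line]) := by
  simp only [aStep, aClassify]
  split_ifs <;> rfl

lemma foldA_getD (lines : List String) (g : PySem.Dict String (List String)) (key : String) :
    (lines.foldl aStep g).getD key [] =
      g.getD key [] ++ lines.filter (fun l => decide (aClassify (aHead l) = some key)) := by
  induction lines generalizing g with
  | nil => simp
  | cons l rest ih =>
    simp only [List.foldl_cons, List.filter_cons]
    rw [aStep_eq]
    cases h : aClassify (aHead l) with
    | none => simp [ih]
    | some k =>
      rw [ih]
      rw [PySem.Dict.getD_modify]
      by_cases hk : key = k
      · subst hk; simp [List.append_assoc]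
      · simp [hk, Ne.symm hk]

lemma classify_rf (c : String) : (aClassify c = some "rf_core") ↔ c ∈ rfCommands := by
  unfold aClassify
  split_ifs with h1 h2 h3 h4 h5 h6 <;> simp_all
  rcases h1 with rfl | rfl | rfl <;> decide

lemma classify_det (c : String) : (aClassify c = some "detection") ↔ c ∈ detectionCommands := by
  unfold aClassify
  split_ifs with h1 h2 h3 h4 h5 h6 <;> simp_all
  · rcases h1 with rfl | rfl | rfl <;> decide
  · fin_cases h2 <;> decide

lemma classify_geo (c : String) : (aClassify c = some "geometry") ↔ c ∈ geometryCommands := by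
  unfold aClassify
  split_ifs with h1 h2 h3 h4 h5 h6 <;> simp_all
  · rcases h1 with rfl | rfl | rfl <;> decide
  · fin_cases h2 <;> decide
  · fin_cases h3 <;> decide

lemma classify_pres (c : String) : (aClassify c = some "presence") ↔ c ∈ presenceCommands := by
  unfold aClassify
  split_ifs with h1 h2 h3 h4 h5 h6 <;> simp_all
  · rcases h1 with rfl | rfl | rfl <;> decide
  · fin_cases h2 <;> decide
  · fin_cases h3 <;> decide
  · fin_cases h4 <;> decide
  · fin_cases h5 <;> decide

lemma classify_trk (c : String) : (aClassify c = some "tracker") ↔ c ∉ knownCommands := by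
  unfold aClassify knownCommands
  split_ifs with h1 h2 h3 h4 h5 h6 <;> simp_all
  all_goals first
    | (fin_cases h5 <;> decide)
    | (intro hA hB hC _ _ _; rcases h1 with rfl | rfl | rfl <;> simp_all)

lemma filter_key (lines : List String) (key : String) (P : String → Prop) [DecidablePred P]
    (h : ∀ c, (aClassify c = some key) ↔ P c) :
    lines.filter (fun l => decide (aClassify (aHead l) = some key)) =
      lines.filter (fun l => decide (P (aHead l))) := by
  apply List.filter_congr
  intro l _
  exact decide_eq_decide.mpr (h (aHead l))

-- ===== VERDICT (by name: the statement is the Claim_ definition above) =====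
theorem build_stage_commands_spec : Claim_equal_build_stage_commands := by
  intro lines _ _
  unfold Spec_build_stage_commands build_stage_commands build_stage_commands_alt
  have h0 : ∀ key : String,
      (PySem.Dict.ofList [("rf_core", ([] : List String)), ("detection", []), ("geometry", []),
        ("tracker", []), ("presence", [])]).getD key [] = [] := by
    intro key
    simp [PySem.Dict.ofList, PySem.Dict.update, PySem.Dict.getD_insert]
  have hrf := (foldA_getD lines _ "rf_core").trans
    (by rw [h0, List.nil_append, filter_key lines "rf_core" (· ∈ rfCommands) classify_rf])
  have hdet := (foldA_getD lines _ "detection").trans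
    (by rw [h0, List.nil_append, filter_key lines "detection" (· ∈ detectionCommands) classify_det])
  have hgeo := (foldA_getD lines _ "geometry").trans
    (by rw [h0, List.nil_append, filter_key lines "geometry" (· ∈ geometryCommands) classify_geo])
  have htrk := (foldA_getD lines _ "tracker").trans
    (by rw [h0, List.nil_append, filter_key lines "tracker" (· ∉ knownCommands) classify_trk])
  have hpres := (foldA_getD lines _ "presence").trans
    (by rw [h0, List.nil_append, filter_key lines "presence" (· ∈ presenceCommands) classify_pres])
  simp only [List.foldl_cons, List.foldl_nil, hrf, hdet, hgeo, htrk, hpres]
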